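-- pv_equiv track=rewrite | github.com/ypearson/glympse | glympse.py | reads_diff
-- ===== SOURCE A (Python) =====
-- def reads_diff(ref_read, test_read):
--     ref_alt     = []
--     ref_alt_sub = []
--     new_variant = True
--     for i in range(0,len(test_read)):
--         if not ref_read[i] == test_read[i]:
--             if new_variant:
--                 new_variant = False
--                 ref_alt_sub = [ref_read[i], test_read[i], i]
--             else:
--                 ref_alt_sub[0] = ref_alt_sub[0]+ref_read[i]
--                 ref_alt_sub[1] = ref_alt_sub[1]+test_read[i]
--         else:
--             if not new_variant:
--                 ref_alt += [ref_alt_sub]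
--                 new_variant = True
--     if not new_variant: # check last one
--         ref_alt += [ref_alt_sub]
--     return ref_alt
-- ===== SOURCE B (Python) =====
-- def reads_diff(ref_read, test_read):
--     n = len(test_read)
--     out = []
--     i = 0
--     while i < n:
--         if ref_read[i] == test_read[i]:
--             i += 1
--         else:
--             j = i + 1
--             while j < n and ref_read[j] != test_read[j]:
--                 j += 1
--             out.append([ref_read[i:j], test_read[i:j], i])
--             i = j
--     return out
-- ===== Notes on version B (the rewrite author's own statement) =====
-- stated objective: alternative
-- what changed: B replaces A's flag-driven state machine that grows the current variant's substrings character by character with a two-level scan that finds each mismatch run's end index and emits string slices directly.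
import Mathlib
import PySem

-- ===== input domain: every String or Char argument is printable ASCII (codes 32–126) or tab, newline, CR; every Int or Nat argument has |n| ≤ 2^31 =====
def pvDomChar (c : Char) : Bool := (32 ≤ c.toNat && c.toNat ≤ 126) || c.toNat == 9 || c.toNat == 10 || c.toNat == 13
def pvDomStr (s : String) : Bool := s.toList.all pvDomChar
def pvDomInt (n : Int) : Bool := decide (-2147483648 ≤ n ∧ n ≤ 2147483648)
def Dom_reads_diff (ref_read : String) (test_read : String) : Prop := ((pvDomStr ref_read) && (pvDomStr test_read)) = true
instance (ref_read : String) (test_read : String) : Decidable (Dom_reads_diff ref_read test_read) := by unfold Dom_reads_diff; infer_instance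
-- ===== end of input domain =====

-- B finds each mismatch run's end index and emits slices, instead of A's flag-driven
-- character-by-character accumulation; objective: alternative (same O(n) cost).

-- ===== PORT A =====
-- A's loop state: (ref_alt, ref_alt_sub, new_variant).  The growing substrings of
-- ref_alt_sub are carried as List Char (Python's s1 + s2 is ++ on the char lists;
-- Lean's String.append is opaque to the kernel) and wrapped into String at the points
-- where A appends ref_alt_sub to ref_alt.  Indexing rl.getD i ' ' equals Python's
-- ref_read[i] for every index the loop reaches inside Pre_ (0 ≤ i < length).
def pvStepA (rl tl : List Char)
    (s : List (String × String × Int) × (List Char × List Char × Int) × Bool)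
    (i : Nat) : List (String × String × Int) × (List Char × List Char × Int) × Bool :=
  let acc := s.1
  let sub := s.2.1
  let nv := s.2.2
  if ¬ (rl.getD i ' ' = tl.getD i ' ') then
    if nv then
      (acc, ([rl.getD i ' '], [tl.getD i ' '], (i : Int)), false)
    else
      (acc, (sub.1 ++ [rl.getD i ' '], sub.2.1 ++ [tl.getD i ' '], sub.2.2), false)
  else
    if nv then (acc, sub, true)
    else (acc ++ [(String.ofList sub.1, String.ofList sub.2.1, sub.2.2)], sub, true)

def reads_diff (ref_read : String) (test_read : String) : List (String × String × Int) :=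
  let rl := ref_read.toList
  let tl := test_read.toList
  let s := (List.range tl.length).foldl (pvStepA rl tl) ([], ([], [], 0), true)
  if s.2.2 then s.1
  else s.1 ++ [(String.ofList s.2.1.1, String.ofList s.2.1.2.1, s.2.1.2.2)]

-- ===== PORT B =====
-- inner while loop of Source B: first index j' ≥ j with j' = n or ref[j'] == test[j']
def pvScanB (rl tl : List Char) (n : Nat) (j : Nat) : Nat :=
  if h : j < n then
    if ¬ (rl.getD j ' ' = tl.getD j ' ') then pvScanB rl tl n (j + 1) else j
  else j
termination_by n - j

theorem pvScanB_ge (rl tl : List Char) (n j : Nat) : j ≤ pvScanB rl tl n j := by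
  unfold pvScanB
  split
  · split
    · exact le_trans (Nat.le_succ j) (pvScanB_ge rl tl n (j + 1))
    · exact le_refl j
  · exact le_refl j
termination_by n - j

-- outer while loop of Source B; ref_read[i:j] with 0 ≤ i ≤ j is (take j).drop i
def pvGoB (rl tl : List Char) (n : Nat) (i : Nat) : List (String × String × Int) :=
  if h : i < n then
    if rl.getD i ' ' = tl.getD i ' ' then pvGoB rl tl n (i + 1)
    else
      (String.ofList ((rl.take (pvScanB rl tl n (i + 1))).drop i),
       String.ofList ((tl.take (pvScanB rl tl n (i + 1))).drop i), (i : Int))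
        :: pvGoB rl tl n (pvScanB rl tl n (i + 1))
  else []
termination_by n - i
decreasing_by
  · omega
  · have := pvScanB_ge rl tl n (i + 1); omega

def reads_diff_alt (ref_read : String) (test_read : String) : List (String × String × Int) :=
  pvGoB ref_read.toList test_read.toList test_read.toList.length 0

-- ===== PRECONDITION & SPEC =====
-- Pre_ excludes exactly the inputs where Python A raises IndexError:
-- the loop reads ref_read[i] for every i < len(test_read), so A raises iff
-- len(ref_read) < len(test_read).  (B raises on the same inputs.)
def Pre_reads_diff (ref_read : String) (test_read : String) : Prop :=
  test_read.toList.length ≤ ref_read.toList.length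
instance (ref_read : String) (test_read : String) : Decidable (Pre_reads_diff ref_read test_read) := by unfold Pre_reads_diff; infer_instance

def pvWitness_reads_diff : String × String := ("abcdx", "axcd")

def Spec_reads_diff (ref_read : String) (test_read : String) (out : List (String × String × Int)) : Prop := out = reads_diff_alt ref_read test_read
instance (ref_read : String) (test_read : String) (out : List (String × String × Int)) : Decidable (Spec_reads_diff ref_read test_read out) := by unfold Spec_reads_diff; infer_instance

-- ===== CLAIM (what is proved, stated in full; the proofs are below) =====
def Claim_equal_reads_diff : Prop := ∀ (ref_read : String) (test_read : String), Dom_reads_diff ref_read test_read → Pre_reads_diff ref_read test_read → Spec_reads_diff ref_read test_read (reads_diff ref_read test_read)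

-- ===== LEMMAS AND PROOFS =====

-- A's final flush, as a function of the loop state
def pvFinishA (s : List (String × String × Int) × (List Char × List Char × Int) × Bool) :
    List (String × String × Int) :=
  if s.2.2 then s.1
  else s.1 ++ [(String.ofList s.2.1.1, String.ofList s.2.1.2.1, s.2.1.2.2)]

theorem drop_take_cons (l : List Char) (d : Char) (i j : Nat) (hij : i < j) (hil : i < l.length) :
    (l.take j).drop i = (l[i]?).getD d :: (l.take j).drop (i + 1) := by
  have h : i < (l.take j).length := by simp [List.length_take]; omega
  rw [List.drop_eq_getElem_cons h, List.getElem_take]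
  simp [List.getElem?_eq_getElem hil]

theorem pvScanB_of_ne (rl tl : List Char) (n j : Nat) (hj : j < n)
    (h : ¬ ((rl[j]?).getD ' ' = (tl[j]?).getD ' ')) :
    pvScanB rl tl n j = pvScanB rl tl n (j + 1) := by
  rw [pvScanB]; simp [List.getD, hj, h]

theorem pvScanB_of_eq (rl tl : List Char) (n j : Nat)
    (h : (rl[j]?).getD ' ' = (tl[j]?).getD ' ') :
    pvScanB rl tl n j = j := by
  rw [pvScanB]; split <;> simp [List.getD, h]

theorem pvScanB_stop (rl tl : List Char) (n : Nat) : pvScanB rl tl n n = n := by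
  rw [pvScanB]; simp

-- the combined loop invariant: processing indices [i, i+k) of A's loop from a
-- not-in-variant state gives B's output from i; from an in-variant state with
-- partial run (S, T, a) it gives the completed run followed by B's output
theorem pvMain (rl tl : List Char) (n : Nat) (hrn : n ≤ rl.length) (htn : n ≤ tl.length)
    (k : Nat) :
    (∀ i, i + k = n → ∀ acc sub,
      pvFinishA ((List.range' i k).foldl (pvStepA rl tl) (acc, sub, true)) =
        acc ++ pvGoB rl tl n i) ∧
    (∀ i, i + k = n → ∀ acc (S T : List Char) (a : Int),
      pvFinishA ((List.range' i k).foldl (pvStepA rl tl) (acc, (S, T, a), false)) =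
        acc ++ (String.ofList (S ++ (rl.take (pvScanB rl tl n i)).drop i),
                String.ofList (T ++ (tl.take (pvScanB rl tl n i)).drop i), a)
              :: pvGoB rl tl n (pvScanB rl tl n i)) := by
  induction k with
  | zero =>
    constructor
    · intro i hi acc sub
      rw [pvGoB]
      simp [pvFinishA, List.range', show ¬ i < n by omega]
    · intro i hi acc S T a
      have hin : i = n := by omega
      subst hin
      have hdr : (rl.take i).drop i = [] := by
        apply List.drop_eq_nil_of_le; simp [List.length_take]
      have hdt : (tl.take i).drop i = [] := by
        apply List.drop_eq_nil_of_le; simp [List.length_take]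
      rw [pvGoB]
      simp [pvFinishA, List.range', pvScanB_stop, hdr, hdt]
  | succ k ih =>
    constructor
    · intro i hi acc sub
      have hiln : i < n := by omega
      rw [List.range'_succ, List.foldl_cons]
      by_cases hc : (rl[i]?).getD ' ' = (tl[i]?).getD ' '
      · rw [show pvStepA rl tl (acc, sub, true) i = (acc, sub, true) by
          simp [pvStepA, List.getD, hc]]
        rw [ih.1 (i + 1) (by omega) acc sub]
        conv_rhs => rw [pvGoB]
        rw [dif_pos hiln, if_pos (show rl.getD i ' ' = tl.getD i ' ' by
          simpa [List.getD] using hc)]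
      · rw [show pvStepA rl tl (acc, sub, true) i
            = (acc, ([(rl[i]?).getD ' '], [(tl[i]?).getD ' '], (i : Int)), false) by
          simp [pvStepA, List.getD, hc]]
        rw [ih.2 (i + 1) (by omega) acc _ _ _]
        conv_rhs => rw [pvGoB]
        rw [dif_pos hiln, if_neg (show ¬ rl.getD i ' ' = tl.getD i ' ' by
          simpa [List.getD] using hc)]
        have hsc : i + 1 ≤ pvScanB rl tl n (i + 1) := pvScanB_ge rl tl n (i + 1)
        rw [drop_take_cons rl ' ' i (pvScanB rl tl n (i + 1)) (by omega) (by omega),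
            drop_take_cons tl ' ' i (pvScanB rl tl n (i + 1)) (by omega) (by omega)]
        simp
    · intro i hi acc S T a
      have hiln : i < n := by omega
      rw [List.range'_succ, List.foldl_cons]
      by_cases hc : (rl[i]?).getD ' ' = (tl[i]?).getD ' '
      · rw [show pvStepA rl tl (acc, (S, T, a), false) i
            = (acc ++ [(String.ofList S, String.ofList T, a)], (S, T, a), true) by
          simp [pvStepA, List.getD, hc]]
        rw [ih.1 (i + 1) (by omega) _ _]
        rw [pvScanB_of_eq rl tl n i hc]
        have hdr : (rl.take i).drop i = [] := by
          apply List.drop_eq_nil_of_le; simp [List.length_take]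
        have hdt : (tl.take i).drop i = [] := by
          apply List.drop_eq_nil_of_le; simp [List.length_take]
        conv_rhs => rw [pvGoB]
        rw [dif_pos hiln, if_pos (show rl.getD i ' ' = tl.getD i ' ' by
          simpa [List.getD] using hc)]
        simp [hdr, hdt]
      · rw [show pvStepA rl tl (acc, (S, T, a), false) i
            = (acc, (S ++ [(rl[i]?).getD ' '], T ++ [(tl[i]?).getD ' '], a), false) by
          simp [pvStepA, List.getD, hc]]
        rw [ih.2 (i + 1) (by omega) acc _ _ _]
        rw [pvScanB_of_ne rl tl n i hiln hc]
        have hsc : i + 1 ≤ pvScanB rl tl n (i + 1) := pvScanB_ge rl tl n (i + 1)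
        rw [drop_take_cons rl ' ' i (pvScanB rl tl n (i + 1)) (by omega) (by omega),
            drop_take_cons tl ' ' i (pvScanB rl tl n (i + 1)) (by omega) (by omega)]
        simp

-- ===== VERDICT (by name: the statement is the Claim_ definition above) =====
theorem reads_diff_spec : Claim_equal_reads_diff := by
  intro ref_read test_read _ hpre
  unfold Spec_reads_diff reads_diff reads_diff_alt
  have h := (pvMain ref_read.toList test_read.toList test_read.toList.length hpre le_rfl
      test_read.toList.length).1 0 (by omega) [] ([], [], 0)
  simp only [List.range_eq_range']
  simpa [pvFinishA] using h
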